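-- pv_equiv track=rewrite | github.com/YujunZhou/EVOL-RL | verl/verl/workers/reward_manager/ttrl.py | _data_source_to_task
-- ===== SOURCE A (Python) =====
-- def _data_source_to_task(data_source):
--     # Standardize
--     ds = str(data_source)
--     if ds in ["MATH-TTT", "AIME-TTT", "AMC-TTT", "AIME25"]:
--         return "math"
--     if ds in ["GPQA-TTT"]:
--         return "gpqa"
--     if ds in ["BBEH", "bbeh", "BigBench-Extra-Hard"]:
--         return "bbeh"
--
--     dsl = ds.lower()
--     # Keyword matching (more robust)
--     if any(key in dsl for key in ["gpqa"]):
--         return "gpqa"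
--     if any(key in dsl for key in ["aime", "math", "amc", "aime25"]):
--         return "math"
--     if "bbeh" in dsl or "bigbench" in dsl:
--         return "bbeh"
--
--     raise NotImplementedError(f"Data source {data_source} is not supported for TTRLRewardManager")
-- ===== SOURCE B (Python) =====
-- # B: table-driven classifier. The exact-match block in A is redundant (each exact
-- # string lowercased contains its keyword), so one ordered dispatch table suffices.
-- _TASK_TABLE = [
--     (("gpqa",), "gpqa"),
--     (("aime", "math", "amc"), "math"),
--     (("bbeh", "bigbench"), "bbeh"),
-- ]
--
-- def _data_source_to_task(data_source):
--     dsl = str(data_source).lower()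
--     for keys, task in _TASK_TABLE:
--         if any(k in dsl for k in keys):
--             return task
--     raise NotImplementedError(f"Data source {data_source} is not supported for TTRLRewardManager")
-- ===== Notes on version B (the rewrite author's own statement) =====
-- stated objective: simpler
-- what changed: Replaced A's redundant exact-match block and three hardcoded keyword if-blocks with a single loop over an ordered dispatch table of (keywords, task) entries; each exact string lowercased already contains its keyword, so one table-driven pass suffices.
import Mathlib
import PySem

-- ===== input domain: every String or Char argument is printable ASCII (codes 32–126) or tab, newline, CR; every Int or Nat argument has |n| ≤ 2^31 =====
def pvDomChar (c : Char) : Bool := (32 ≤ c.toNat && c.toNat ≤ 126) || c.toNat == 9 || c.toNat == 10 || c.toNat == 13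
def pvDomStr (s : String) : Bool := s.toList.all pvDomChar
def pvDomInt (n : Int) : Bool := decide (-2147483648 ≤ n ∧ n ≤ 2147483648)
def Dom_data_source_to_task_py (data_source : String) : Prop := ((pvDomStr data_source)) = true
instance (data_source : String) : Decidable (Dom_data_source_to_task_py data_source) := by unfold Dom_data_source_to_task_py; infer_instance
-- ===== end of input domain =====

-- B replaces A's exact-match block and three keyword if-blocks by one loop over an
-- ordered dispatch table (simpler); the final `raise` is excluded by Pre_ below.

-- ===== PORT A =====
-- literal transliteration of A; the `raise NotImplementedError` branch (outside
-- Pre_) is represented by "" since the port must be total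
def data_source_to_task_py (data_source : String) : String :=
  let ds := data_source  -- str(data_source): data_source is already a String
  if ds = "MATH-TTT" ∨ ds = "AIME-TTT" ∨ ds = "AMC-TTT" ∨ ds = "AIME25" then "math"
  else if ds = "GPQA-TTT" then "gpqa"
  else if ds = "BBEH" ∨ ds = "bbeh" ∨ ds = "BigBench-Extra-Hard" then "bbeh"
  else
    let dsl := PySem.Str.lower ds
    if (["gpqa"]).any (fun key => PySem.Str.isIn key dsl) then "gpqa"
    else if (["aime", "math", "amc", "aime25"]).any (fun key => PySem.Str.isIn key dsl) then "math"
    else if PySem.Str.isIn "bbeh" dsl || PySem.Str.isIn "bigbench" dsl then "bbeh"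
    else ""  -- raise NotImplementedError (excluded by Pre_)

-- ===== PORT B =====
def altTable : List (List String × String) :=
  [(["gpqa"], "gpqa"), (["aime", "math", "amc"], "math"), (["bbeh", "bigbench"], "bbeh")]

-- the `for keys, task in _TASK_TABLE` loop of Source B
def altLookup (dsl : String) : List (List String × String) → Option String
  | [] => none
  | (keys, task) :: rest =>
      if keys.any (fun k => PySem.Str.isIn k dsl) then some task else altLookup dsl rest

-- `none` = the raise branch (outside Pre_); represented by "" since the port must be total
def data_source_to_task_py_alt (data_source : String) : String :=
  (altLookup (PySem.Str.lower data_source) altTable).getD ""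

-- ===== PRECONDITION & SPEC =====
-- Pre_ excludes exactly the inputs on which A (and B) raise NotImplementedError:
-- strings whose lowercasing contains none of the recognised keywords.
def Pre_data_source_to_task_py (data_source : String) : Prop :=
  (["gpqa", "aime", "math", "amc", "bbeh", "bigbench"]).any
    (fun key => PySem.Str.isIn key (PySem.Str.lower data_source)) = true
instance (data_source : String) : Decidable (Pre_data_source_to_task_py data_source) := by
  unfold Pre_data_source_to_task_py; infer_instance

def pvWitness_data_source_to_task_py : String := "MATH-TTT"

def Spec_data_source_to_task_py (data_source : String) (out : String) : Prop :=
  out = data_source_to_task_py_alt data_source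
instance (data_source : String) (out : String) : Decidable (Spec_data_source_to_task_py data_source out) := by
  unfold Spec_data_source_to_task_py; infer_instance

-- ===== CLAIM (what is proved, stated in full; the proofs are below) =====
def Claim_equal_data_source_to_task_py : Prop :=
  ∀ (data_source : String), Dom_data_source_to_task_py data_source →
    Pre_data_source_to_task_py data_source →
      Spec_data_source_to_task_py data_source (data_source_to_task_py data_source)

-- ===== LEMMAS AND PROOFS =====

-- "aime25" in s implies "aime" in s ("aime" is a prefix of "aime25")
lemma isIn_aime_of_isIn_aime25 (s : String)
    (h : PySem.Str.isIn "aime25" s = true) : PySem.Str.isIn "aime" s = true := by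
  rw [PySem.Str.isIn_iff_infix] at h ⊢
  exact List.IsInfix.trans (by decide) h

-- A's keyword disjunction equals B's: the "aime25" disjunct is absorbed by "aime"
lemma math_cond_eq (s : String) :
    (PySem.Str.isIn "aime" s || (PySem.Str.isIn "math" s ||
      (PySem.Str.isIn "amc" s || PySem.Str.isIn "aime25" s)))
    = (PySem.Str.isIn "aime" s || (PySem.Str.isIn "math" s || PySem.Str.isIn "amc" s)) := by
  cases h25 : PySem.Str.isIn "aime25" s
  · simp only [Bool.or_false]
  · simp only [isIn_aime_of_isIn_aime25 s h25, Bool.true_or]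

-- ===== VERDICT (by name: the statement is the Claim_ definition above) =====
theorem data_source_to_task_py_spec : Claim_equal_data_source_to_task_py := by
  intro ds _ hpre
  unfold Spec_data_source_to_task_py
  by_cases h1 : ds = "MATH-TTT"; · subst h1; decide
  by_cases h2 : ds = "AIME-TTT"; · subst h2; decide
  by_cases h3 : ds = "AMC-TTT"; · subst h3; decide
  by_cases h4 : ds = "AIME25"; · subst h4; decide
  by_cases h5 : ds = "GPQA-TTT"; · subst h5; decide
  by_cases h6 : ds = "BBEH"; · subst h6; decide
  by_cases h7 : ds = "bbeh"; · subst h7; decide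
  by_cases h8 : ds = "BigBench-Extra-Hard"; · subst h8; decide
  simp only [data_source_to_task_py, data_source_to_task_py_alt, altTable, altLookup,
    List.any_cons, List.any_nil, h1, h2, h3, h4, h5, h6, h7, h8, or_self, if_false, Bool.or_false, math_cond_eq]
  split_ifs with hg hm hb
  · rfl
  · rfl
  · rfl
  · -- no keyword matched: A hits its raise branch, contradicting Pre_
    exfalso
    unfold Pre_data_source_to_task_py at hpre
    simp only [List.any_cons, List.any_nil, Bool.or_eq_true] at hpre hg hm hb
    rcases hpre with h | h | h | h | h | h | h
    · exact hg h
    · exact hm (Or.inl h)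
    · exact hm (Or.inr (Or.inl h))
    · exact hm (Or.inr (Or.inr h))
    · exact hb (Or.inl h)
    · exact hb (Or.inr h)
    · exact absurd h (by simp)
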